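-- pv_equiv track=rewrite | github.com/JamesDyk/discord-twitter-bot | bot/utils/processor.py | worth_posting_track
-- ===== SOURCE A (Python) =====
-- def worth_posting_track(track, hashtags, text, retweeted, include_retweet):
--     for t in track:
--         if t.startswith("#"):
--             if t[1:] in map(lambda x: x["text"], hashtags):
--                 if not include_retweet and retweeted:
--                     return False
--                 return True
--         elif t in text:
--             if not include_retweet and retweeted:
--                 return False
--             return True
--     return False
-- ===== SOURCE B (Python) =====
-- def worth_posting_track(track, hashtags, text, retweeted, include_retweet):
--     if retweeted and not include_retweet:
--         return False
--     wanted = {t[1:] for t in track if t.startswith("#")}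
--     tags = {h.get("text") for h in hashtags}
--     if wanted & tags:
--         return True
--     return any(t in text for t in track if not t.startswith("#"))
-- ===== Notes on version B (the rewrite author's own statement) =====
-- stated objective: alternative
-- what changed: B first settles the retweet guard once by an early return, then decides hashtag matches by building two sets (wanted '#'-names from track, tag texts from hashtags) and testing their intersection, and finally scans only the non-'#' terms for a substring hit, instead of A's single fused first-match loop with the retweet guard duplicated in both branches.
import Mathlib
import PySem

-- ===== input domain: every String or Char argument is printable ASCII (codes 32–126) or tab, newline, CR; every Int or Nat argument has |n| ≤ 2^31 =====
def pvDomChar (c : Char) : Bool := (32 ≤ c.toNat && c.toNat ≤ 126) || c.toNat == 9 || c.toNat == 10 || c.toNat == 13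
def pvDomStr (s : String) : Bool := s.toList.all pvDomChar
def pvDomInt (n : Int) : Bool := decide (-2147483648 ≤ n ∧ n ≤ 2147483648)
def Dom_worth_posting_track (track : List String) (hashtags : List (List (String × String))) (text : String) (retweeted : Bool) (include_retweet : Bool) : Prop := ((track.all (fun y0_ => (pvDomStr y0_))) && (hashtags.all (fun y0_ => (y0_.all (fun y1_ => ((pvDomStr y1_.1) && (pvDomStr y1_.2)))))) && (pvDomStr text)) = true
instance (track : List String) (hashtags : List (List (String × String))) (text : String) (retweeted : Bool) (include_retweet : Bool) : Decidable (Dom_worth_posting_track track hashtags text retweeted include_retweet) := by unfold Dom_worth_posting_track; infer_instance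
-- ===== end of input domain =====

-- B settles the retweet guard once up front, then decides hashtag matches by a set intersection
-- (wanted '#'-names from track vs tag texts) and scans only the plain terms for a substring hit (objective: alternative).

-- ===== PORT A =====
-- A's x["text"]: ported as getD with default ""; exact under Pre_, where every dict A's scan reaches has the key.
def worth_posting_track_loop (hashtags : List (List (String × String))) (text : String) (retweeted : Bool) (include_retweet : Bool) : List String → Bool
  | [] => false
  | t :: rest =>
    if PySem.Str.startswith t "#" then
      if (hashtags.map (fun x => PySem.Dict.getD (PySem.Dict.mk x) "text" "")).contains (PySem.Str.slice t (some 1) none) then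
        if !include_retweet && retweeted then false else true
      else worth_posting_track_loop hashtags text retweeted include_retweet rest
    else if PySem.Str.isIn t text then
      if !include_retweet && retweeted then false else true
    else worth_posting_track_loop hashtags text retweeted include_retweet rest

def worth_posting_track (track : List String) (hashtags : List (List (String × String))) (text : String) (retweeted : Bool) (include_retweet : Bool) : Bool :=
  worth_posting_track_loop hashtags text retweeted include_retweet track

-- ===== PORT B =====
-- B's tags set holds h.get("text") results (None possible), so both sets are typed Set (Option String);
-- wanted's elements are Python strings, wrapped in `some` (exact: None never equals a str in Python).
def worth_posting_track_alt (track : List String) (hashtags : List (List (String × String))) (text : String) (retweeted : Bool) (include_retweet : Bool) : Bool :=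
  if retweeted && !include_retweet then false
  else
    let wanted : PySem.Set (Option String) :=
      PySem.Set.ofList ((track.filter (fun t => PySem.Str.startswith t "#")).map
        (fun t => some (PySem.Str.slice t (some 1) none)))
    let tags : PySem.Set (Option String) :=
      PySem.Set.ofList (hashtags.map (fun h => PySem.Dict.get? (PySem.Dict.mk h) "text"))
    if !(PySem.Set.inter wanted tags).isEmpty then true
    else (track.filter (fun t => !(PySem.Str.startswith t "#"))).any (fun t => PySem.Str.isIn t text)

-- ===== PRECONDITION & SPEC =====
-- texts of the hashtag dicts before the first keyless one (Python's lazy 'in map(...)' scans these before raising)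
def pvGoodTexts (hashtags : List (List (String × String))) : List String :=
  (hashtags.takeWhile (fun h => (PySem.Dict.mk h).contains "text")).map
    (fun x => PySem.Dict.getD (PySem.Dict.mk x) "text" "")

-- Pre_ excludes exactly the inputs on which A raises KeyError: a keyless hashtag dict exists and, scanning track,
-- the first term that is a '#'-hashtag or occurs in text is a '#'-hashtag whose name is not among the texts before
-- the first keyless dict — there A's lazy 'in map(...)' reaches the keyless dict and raises.
def Pre_worth_posting_track (track : List String) (hashtags : List (List (String × String))) (text : String) (retweeted : Bool) (include_retweet : Bool) : Prop :=
  (∀ h ∈ hashtags, (PySem.Dict.mk h).contains "text" = true) ∨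
  (∀ t ∈ (track.dropWhile (fun t => !(PySem.Str.startswith t "#") && !(PySem.Str.isIn t text))).take 1,
    PySem.Str.startswith t "#" = false ∨
      (pvGoodTexts hashtags).contains (PySem.Str.slice t (some 1) none) = true)
instance (track : List String) (hashtags : List (List (String × String))) (text : String) (retweeted : Bool) (include_retweet : Bool) : Decidable (Pre_worth_posting_track track hashtags text retweeted include_retweet) := by unfold Pre_worth_posting_track; infer_instance

def pvWitness_worth_posting_track : List String × (List (List (String × String))) × String × Bool × Bool :=
  (["#a", "b"], [[("text", "a")]], "hello b", false, true)

def Spec_worth_posting_track (track : List String) (hashtags : List (List (String × String))) (text : String) (retweeted : Bool) (include_retweet : Bool) (out : Bool) : Prop := out = worth_posting_track_alt track hashtags text retweeted include_retweet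
instance (track : List String) (hashtags : List (List (String × String))) (text : String) (retweeted : Bool) (include_retweet : Bool) (out : Bool) : Decidable (Spec_worth_posting_track track hashtags text retweeted include_retweet out) := by unfold Spec_worth_posting_track; infer_instance

-- ===== CLAIM =====
def Claim_equal_worth_posting_track : Prop := ∀ (track : List String) (hashtags : List (List (String × String))) (text : String) (retweeted : Bool) (include_retweet : Bool), Dom_worth_posting_track track hashtags text retweeted include_retweet → Pre_worth_posting_track track hashtags text retweeted include_retweet → Spec_worth_posting_track track hashtags text retweeted include_retweet (worth_posting_track track hashtags text retweeted include_retweet)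


-- ===== LEMMAS AND PROOFS =====

-- A's per-match two-branch return collapses to one boolean.
theorem pv_guard_eq (r i : Bool) : (if !i && r then false else true) = (i || !r) := by
  cases r <;> cases i <;> rfl

-- A's loop = "any match" && the collapsed verdict
theorem pv_loop_eq (hashtags : List (List (String × String))) (text : String) (r i : Bool) (ts : List String) :
    worth_posting_track_loop hashtags text r i ts =
      (ts.any (fun t =>
        if PySem.Str.startswith t "#" then
          (hashtags.map (fun x => PySem.Dict.getD (PySem.Dict.mk x) "text" "")).contains (PySem.Str.slice t (some 1) none)
        else PySem.Str.isIn t text) && (i || !r)) := by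
  induction ts with
  | nil => rfl
  | cons t rest ih =>
    simp only [worth_posting_track_loop, List.any_cons, pv_guard_eq]
    split_ifs with hs hm ht
    · simp at hm ⊢; exact fun _ => Or.inl hm
    · rw [ih]; rw [Bool.not_eq_true] at hm; rw [hm, Bool.false_or]
    · simp at ht ⊢; exact fun _ => Or.inl ht
    · rw [ih]; rw [Bool.not_eq_true] at ht; rw [ht, Bool.false_or]

-- splitting an any over the two branches of its conditional body
theorem pv_any_split {α : Type} (l : List α) (p : α → Bool) (f g : α → Bool) :
    l.any (fun x => if p x then f x else g x) =
      ((l.filter p).any f || (l.filter (fun x => !p x)).any g) := by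
  induction l with
  | nil => rfl
  | cons x xs ih =>
    by_cases hp : p x = true <;>
      simp [List.any_cons, hp, ih, Bool.or_assoc, Bool.or_left_comm]

-- when every hashtag dict has the key, get? = some getD
theorem pv_get?_eq_some_getD (h : List (String × String))
    (hk : (PySem.Dict.mk h).contains "text" = true) :
    PySem.Dict.get? (PySem.Dict.mk h) "text" = some (PySem.Dict.getD (PySem.Dict.mk h) "text" "") := by
  rw [PySem.Dict.contains_eq_isSome_get?] at hk
  obtain ⟨v, hv⟩ := Option.isSome_iff_exists.1 hk
  rw [hv, PySem.Dict.getD_eq_get?_getD, hv]; rfl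

-- under Pre_'s key condition, B's set intersection is nonempty iff some '#'-term's name is a tag text
theorem pv_inter_match (track : List String) (hashtags : List (List (String × String)))
    (hk : ∀ h ∈ hashtags, (PySem.Dict.mk h).contains "text" = true) :
    (!(PySem.Set.inter
        (PySem.Set.ofList ((track.filter (fun t => PySem.Str.startswith t "#")).map
          (fun t => some (PySem.Str.slice t (some 1) none))))
        (PySem.Set.ofList (hashtags.map (fun h => PySem.Dict.get? (PySem.Dict.mk h) "text")))).isEmpty) =
    (track.filter (fun t => PySem.Str.startswith t "#")).any (fun t =>
      (hashtags.map (fun x => PySem.Dict.getD (PySem.Dict.mk x) "text" "")).contains (PySem.Str.slice t (some 1) none)) := by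
  have hmap : hashtags.map (fun h => PySem.Dict.get? (PySem.Dict.mk h) "text")
      = (hashtags.map (fun x => PySem.Dict.getD (PySem.Dict.mk x) "text" "")).map some := by
    rw [List.map_map]
    exact List.map_congr_left (fun h hh => pv_get?_eq_some_getD h (hk h hh))
  rw [hmap, Bool.eq_iff_iff]
  constructor
  · intro h
    have hne : (PySem.Set.inter
        (PySem.Set.ofList ((track.filter (fun t => PySem.Str.startswith t "#")).map
          (fun t => some (PySem.Str.slice t (some 1) none))))
        (PySem.Set.ofList ((hashtags.map (fun x => PySem.Dict.getD (PySem.Dict.mk x) "text" "")).map some))) ≠ [] := by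
      intro he; rw [he] at h; simp at h
    obtain ⟨x, hx⟩ := List.exists_mem_of_ne_nil _ hne
    rw [PySem.Set.mem_inter, PySem.Set.mem_ofList, PySem.Set.mem_ofList] at hx
    obtain ⟨hxw, hxt⟩ := hx
    obtain ⟨t, ht, rfl⟩ := List.mem_map.1 hxw
    obtain ⟨v, hv, hveq⟩ := List.mem_map.1 hxt
    refine List.any_eq_true.2 ⟨t, ht, ?_⟩
    have hv' : PySem.Str.slice t (some 1) none ∈
        hashtags.map (fun x => PySem.Dict.getD (PySem.Dict.mk x) "text" "") := by
      cases hveq; exact hv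
    simpa using hv'
  · intro h
    obtain ⟨t, ht, hc⟩ := List.any_eq_true.1 h
    have hmem : some (PySem.Str.slice t (some 1) none) ∈ PySem.Set.inter
        (PySem.Set.ofList ((track.filter (fun t => PySem.Str.startswith t "#")).map
          (fun t => some (PySem.Str.slice t (some 1) none))))
        (PySem.Set.ofList ((hashtags.map (fun x => PySem.Dict.getD (PySem.Dict.mk x) "text" "")).map some)) := by
      rw [PySem.Set.mem_inter, PySem.Set.mem_ofList, PySem.Set.mem_ofList]
      refine ⟨List.mem_map.2 ⟨t, ht, rfl⟩, List.mem_map.2 ⟨_, ?_, rfl⟩⟩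
      simpa using hc
    cases hE : (PySem.Set.inter
        (PySem.Set.ofList ((track.filter (fun t => PySem.Str.startswith t "#")).map
          (fun t => some (PySem.Str.slice t (some 1) none))))
        (PySem.Set.ofList ((hashtags.map (fun x => PySem.Dict.getD (PySem.Dict.mk x) "text" "")).map some))).isEmpty
    · rfl
    · rw [List.isEmpty_iff] at hE
      rw [hE] at hmem
      cases hmem

-- list facts about dropWhile used above
theorem pv_drop_nil_all (α : Type) (l : List α) (p : α → Bool) (h : l.dropWhile p = []) :
    ∀ x ∈ l, p x = true := by
  induction l with
  | nil => intro x hx; cases hx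
  | cons a as ih =>
    intro x hx
    by_cases hp : p a = true
    · rw [List.dropWhile_cons_of_pos hp] at h
      rcases List.mem_cons.1 hx with rfl | hx'
      · exact hp
      · exact ih h x hx'
    · rw [List.dropWhile_cons_of_neg hp] at h
      cases h

theorem pv_drop_head_false (α : Type) (l : List α) (p : α → Bool) (t : α) (r : List α)
    (h : l.dropWhile p = t :: r) : p t = false := by
  have hne : l.dropWhile p ≠ [] := by simp [h]
  have h1 := List.head_dropWhile_not p (l := l) (w := hne)
  have h3 : (l.dropWhile p).head hne = t := by simp [h]
  rw [h3] at h1; simpa using h1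

-- a name among the good-prefix texts occurs in A's full getD list and, wrapped in some, in B's get? list
theorem pv_good_sub (hashtags : List (List (String × String))) (name : String)
    (hc : (pvGoodTexts hashtags).contains name = true) :
    (hashtags.map (fun x => PySem.Dict.getD (PySem.Dict.mk x) "text" "")).contains name = true ∧
    (some name) ∈ hashtags.map (fun h => PySem.Dict.get? (PySem.Dict.mk h) "text") := by
  have hc' : name ∈ (hashtags.takeWhile (fun h => (PySem.Dict.mk h).contains "text")).map
      (fun x => PySem.Dict.getD (PySem.Dict.mk x) "text" "") :=
    List.mem_of_elem_eq_true hc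
  obtain ⟨h0, hh0, hrfl⟩ := List.mem_map.1 hc'
  have hmemh : h0 ∈ hashtags := (List.takeWhile_sublist _).mem hh0
  have hkey : (PySem.Dict.mk h0).contains "text" = true := by
    have := List.mem_takeWhile_imp (p := fun h => (PySem.Dict.mk h).contains "text") hh0
    exact this
  constructor
  · simpa using List.mem_map.2 ⟨h0, hmemh, hrfl⟩
  · exact List.mem_map.2 ⟨h0, hmemh, by rw [pv_get?_eq_some_getD h0 hkey, hrfl]⟩

-- ===== VERDICT =====
theorem worth_posting_track_spec : Claim_equal_worth_posting_track := by
  intro track hashtags text retweeted include_retweet _ hpre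
  unfold Spec_worth_posting_track worth_posting_track worth_posting_track_alt
  rw [pv_loop_eq, pv_any_split]
  by_cases hrg : (retweeted && !include_retweet) = true
  · have hio : (include_retweet || !retweeted) = false := by
      cases retweeted <;> cases include_retweet <;> simp_all
    simp [hrg, hio]
  · have hio : (include_retweet || !retweeted) = true := by
      cases retweeted <;> cases include_retweet <;> simp_all
    rw [Bool.not_eq_true] at hrg
    simp only [hrg, hio, Bool.and_true]
    rcases hpre with hk | hg
    · rw [pv_inter_match track hashtags hk]
      cases ((track.filter (fun t => PySem.Str.startswith t "#")).any (fun t =>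
        (hashtags.map (fun x => PySem.Dict.getD (PySem.Dict.mk x) "text" "")).contains
          (PySem.Str.slice t (some 1) none))) <;> simp
    · cases hD : track.dropWhile (fun t => !(PySem.Str.startswith t "#") && !(PySem.Str.isIn t text)) with
      | nil =>
        have hall := pv_drop_nil_all _ track _ hD
        have hfil : track.filter (fun t => PySem.Str.startswith t "#") = [] :=
          List.filter_eq_nil_iff.2 (fun t ht => by
            have h1 := hall t ht; simp only [Bool.and_eq_true, Bool.not_eq_true'] at h1
            rw [h1.1]; exact Bool.false_ne_true)
        have hplain : (track.filter (fun t => !(PySem.Str.startswith t "#"))).any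
            (fun t => PySem.Str.isIn t text) = false := by
          rw [List.any_eq_false]
          intro t ht
          have h1 := hall t (List.mem_filter.1 ht).1
          simp only [Bool.and_eq_true, Bool.not_eq_true'] at h1
          rw [h1.2]; exact Bool.false_ne_true
        rw [hfil]
        simp [PySem.Set.inter, PySem.Set.ofList]
      | cons t rest =>
        have hpt := pv_drop_head_false _ track _ t rest hD
        have hmemd : t ∈ track.dropWhile (fun t => !(PySem.Str.startswith t "#") && !(PySem.Str.isIn t text)) := by
          rw [hD]; exact List.mem_cons_self ..
        have hmem : t ∈ track := (List.dropWhile_sublist _).mem hmemd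
        have hg1 := hg t (by rw [hD]; simp)
        by_cases hsh : PySem.Str.startswith t "#" = true
        · have hgood : (pvGoodTexts hashtags).contains (PySem.Str.slice t (some 1) none) = true := by
            rcases hg1 with h1 | h1
            · rw [hsh] at h1; cases h1
            · exact h1
          obtain ⟨hA, hB⟩ := pv_good_sub hashtags _ hgood
          have ha : (track.filter (fun t => PySem.Str.startswith t "#")).any (fun t =>
              (hashtags.map (fun x => PySem.Dict.getD (PySem.Dict.mk x) "text" "")).contains
                (PySem.Str.slice t (some 1) none)) = true :=
            List.any_eq_true.2 ⟨t, List.mem_filter.2 ⟨hmem, hsh⟩, hA⟩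
          have hmemI : some (PySem.Str.slice t (some 1) none) ∈ PySem.Set.inter
              (PySem.Set.ofList ((track.filter (fun t => PySem.Str.startswith t "#")).map
                (fun t => some (PySem.Str.slice t (some 1) none))))
              (PySem.Set.ofList (hashtags.map (fun h => PySem.Dict.get? (PySem.Dict.mk h) "text"))) := by
            rw [PySem.Set.mem_inter, PySem.Set.mem_ofList, PySem.Set.mem_ofList]
            exact ⟨List.mem_map.2 ⟨t, List.mem_filter.2 ⟨hmem, hsh⟩, rfl⟩, hB⟩
          have hc : (!(PySem.Set.inter
              (PySem.Set.ofList ((track.filter (fun t => PySem.Str.startswith t "#")).map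
                (fun t => some (PySem.Str.slice t (some 1) none))))
              (PySem.Set.ofList (hashtags.map (fun h => PySem.Dict.get? (PySem.Dict.mk h) "text")))).isEmpty) = true := by
            cases hE : (PySem.Set.inter
                (PySem.Set.ofList ((track.filter (fun t => PySem.Str.startswith t "#")).map
                  (fun t => some (PySem.Str.slice t (some 1) none))))
                (PySem.Set.ofList (hashtags.map (fun h => PySem.Dict.get? (PySem.Dict.mk h) "text")))).isEmpty
            · rfl
            · rw [List.isEmpty_iff] at hE; rw [hE] at hmemI; cases hmemI
          rw [ha, hc]
          simp
        · have hsh' : PySem.Str.startswith t "#" = false := Bool.not_eq_true _ ▸ hsh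
          have hin : PySem.Str.isIn t text = true := by
            rw [hsh'] at hpt; simpa using hpt
          have hb : (track.filter (fun t => !(PySem.Str.startswith t "#"))).any
              (fun t => PySem.Str.isIn t text) = true :=
            List.any_eq_true.2 ⟨t, List.mem_filter.2 ⟨hmem, by rw [hsh']; rfl⟩, hin⟩
          rw [hb]
          cases hE : (PySem.Set.inter
              (PySem.Set.ofList ((track.filter (fun t => PySem.Str.startswith t "#")).map
                (fun t => some (PySem.Str.slice t (some 1) none))))
              (PySem.Set.ofList (hashtags.map (fun h => PySem.Dict.get? (PySem.Dict.mk h) "text")))).isEmpty <;>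
            simp
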